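-- pv_equiv track=rewrite | github.com/DariusScheepers/FullSOMGAOptimiser | ConvertMonks/ConvertMonks.py | convertToBinary
-- ===== SOURCE A (Python) =====
-- def convertToBinary(number, min, length):
--     out = ""
--     for i in range(min, length + 1):
--         if i == number:
--             out = out + "1,"
--         else:
--             out = out + "0,"
--     return out
-- ===== SOURCE B (Python) =====
-- def convertToBinary(number, min, length):
--     n = max(0, length + 1 - min)
--     if min <= number <= length:
--         i = number - min
--         return "0," * i + "1," + "0," * (n - i - 1)
--     return "0," * n
-- ===== Notes on version B (the rewrite author's own statement) =====
-- stated objective: simpler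
-- what changed: Replaces the per-element loop comparing each i with number by a closed form: string repetition places the single '1,' at position number-min when min<=number<=length, otherwise returns n zeros.
import Mathlib
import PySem

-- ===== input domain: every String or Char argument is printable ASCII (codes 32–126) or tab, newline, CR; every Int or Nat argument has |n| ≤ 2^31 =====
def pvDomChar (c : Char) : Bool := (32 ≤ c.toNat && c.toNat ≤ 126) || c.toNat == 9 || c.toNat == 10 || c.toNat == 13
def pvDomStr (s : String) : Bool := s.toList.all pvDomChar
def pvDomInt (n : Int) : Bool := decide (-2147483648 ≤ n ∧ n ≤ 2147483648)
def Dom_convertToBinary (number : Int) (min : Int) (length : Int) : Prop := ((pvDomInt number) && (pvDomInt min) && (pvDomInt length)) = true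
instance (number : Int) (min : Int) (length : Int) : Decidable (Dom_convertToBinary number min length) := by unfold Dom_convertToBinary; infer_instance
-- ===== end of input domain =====

-- B replaces the per-element scan with a closed form placing the single "1," by position (objective: simpler).


-- ===== PORT A =====
def convertToBinary (number : Int) (min : Int) (length : Int) : String :=
  (PySem.List.pyRange min (length + 1) 1).foldl
    (fun out i => if i == number then out ++ "1," else out ++ "0,") ""

-- ===== PORT B =====
-- "0," * k
def pvZeros : Nat → String
  | 0 => ""
  | k + 1 => "0," ++ pvZeros k

-- B: closed form — place the single "1," by position instead of scanning each i.
def convertToBinary_alt (number : Int) (min : Int) (length : Int) : String :=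
  let n : Nat := (length + 1 - min).toNat
  if min ≤ number ∧ number ≤ length then
    let i : Nat := (number - min).toNat
    pvZeros i ++ "1," ++ pvZeros (n - i - 1)
  else
    pvZeros n

-- ===== PRECONDITION & SPEC =====
def Spec_convertToBinary (number : Int) (min : Int) (length : Int) (out : String) : Prop := out = convertToBinary_alt number min length
instance (number : Int) (min : Int) (length : Int) (out : String) : Decidable (Spec_convertToBinary number min length out) := by unfold Spec_convertToBinary; infer_instance

-- ===== CLAIM (what is proved, stated in full; the proofs are below) =====
def Claim_equal_convertToBinary : Prop := ∀ (number : Int) (min : Int) (length : Int), Dom_convertToBinary number min length → Spec_convertToBinary number min length (convertToBinary number min length)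

-- ===== LEMMAS AND PROOFS =====

-- ===== VERDICT (by name: the statement is the Claim_ definition above) =====
-- per-element contribution, concatenated without an accumulator
def pvConc (number : Int) : List Int → String
  | [] => ""
  | i :: l => (if i == number then "1," else "0,") ++ pvConc number l

theorem pvFoldl_conc (number : Int) (l : List Int) (acc : String) :
    l.foldl (fun out i => if i == number then out ++ "1," else out ++ "0,") acc
      = acc ++ pvConc number l := by
  induction l generalizing acc with
  | nil => simp [pvConc]
  | cons a l ih =>
    simp only [List.foldl_cons, pvConc, ih]
    by_cases h : a = number <;> simp [h, String.append_assoc]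

theorem pvMain (number : Int) : ∀ (n : Nat) (m b : Int), (b - m).toNat = n →
    pvConc number (PySem.List.pyRange m b 1)
      = if m ≤ number ∧ number < b then
          pvZeros (number - m).toNat ++ "1," ++ pvZeros (n - (number - m).toNat - 1)
        else pvZeros n := by
  intro n
  induction n with
  | zero =>
    intro m b h
    have hb : b ≤ m := by omega
    rw [PySem.List.pyRange_one_eq_nil hb]
    have : ¬ (m ≤ number ∧ number < b) := by omega
    simp [this, pvConc, pvZeros]
  | succ n ih =>
    intro m b h
    have hm : m < b := by omega
    rw [PySem.List.pyRange_one_cons hm, pvConc,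
        ih (m + 1) b (by omega)]
    by_cases hnum : m = number
    · subst hnum
      have h2 : m ≤ m ∧ m < b := by omega
      simp [h2, pvZeros]
    · by_cases hin : m + 1 ≤ number ∧ number < b
      · have h2 : m ≤ number ∧ number < b := by omega
        have hne : (m == number) = false := by simp [hnum]
        have e1 : (number - m).toNat = (number - (m + 1)).toNat + 1 := by omega
        have e2 : n - (number - (m + 1)).toNat - 1
            = n + 1 - (number - m).toNat - 1 := by omega
        simp only [hne, Bool.false_eq_true, if_false, if_pos hin, if_pos h2, e1, e2, pvZeros,
          String.append_assoc]
      · have h2 : ¬ (m ≤ number ∧ number < b) := by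
          rcases (not_and_or.mp hin) with h' | h' <;> omega
        have hne : (m == number) = false := by simp [hnum]
        simp only [hne, Bool.false_eq_true, if_false, if_neg hin, if_neg h2]
        simp [pvZeros]

theorem convertToBinary_spec : Claim_equal_convertToBinary := by
  intro number min length _
  unfold Spec_convertToBinary convertToBinary convertToBinary_alt
  rw [pvFoldl_conc, pvMain number ((length + 1 - min).toNat) min (length + 1) rfl]
  simp
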